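-- pv_equiv track=rewrite | github.com/SamuelPossamai/LineCodeViewer | linecodes.py | generate_MLT3
-- ===== SOURCE A (Python) =====
-- def generate_MLT3(binary_list, init_cond):
--
--     growing = ( init_cond == 1 )
--
--     if init_cond == 0:
--         last = 1
--     elif init_cond == 3:
--         last = -1
--     else:
--         last = 0
--
--     result = []
--     for bit in binary_list:
--         if bit:
--             if growing:
--                 last += 1
--             else:
--                 last -= 1
--
--             if last > 1 or last < -1:
--                 last = 0
--                 growing = not growing
--
--         result.append(last)
--
--     return result
-- ===== SOURCE B (Python) =====
-- _MLT3_PATTERN = (0, 1, 0, -1)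
--
-- def generate_MLT3(binary_list, init_cond):
--     if init_cond == 1:
--         phase = 0
--     elif init_cond == 0:
--         phase = 1
--     elif init_cond == 3:
--         phase = 3
--     else:
--         phase = 2
--     result = []
--     for bit in binary_list:
--         if bit:
--             phase = (phase + 1) % 4
--         result.append(_MLT3_PATTERN[phase])
--     return result
-- ===== Notes on version B (the rewrite author's own statement) =====
-- stated objective: simpler
-- what changed: Replaces the (last, growing) state with increment/overflow/flip logic by a single phase index into the fixed MLT-3 pattern [0,1,0,-1], advanced mod 4 on each 1-bit.
import Mathlib
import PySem

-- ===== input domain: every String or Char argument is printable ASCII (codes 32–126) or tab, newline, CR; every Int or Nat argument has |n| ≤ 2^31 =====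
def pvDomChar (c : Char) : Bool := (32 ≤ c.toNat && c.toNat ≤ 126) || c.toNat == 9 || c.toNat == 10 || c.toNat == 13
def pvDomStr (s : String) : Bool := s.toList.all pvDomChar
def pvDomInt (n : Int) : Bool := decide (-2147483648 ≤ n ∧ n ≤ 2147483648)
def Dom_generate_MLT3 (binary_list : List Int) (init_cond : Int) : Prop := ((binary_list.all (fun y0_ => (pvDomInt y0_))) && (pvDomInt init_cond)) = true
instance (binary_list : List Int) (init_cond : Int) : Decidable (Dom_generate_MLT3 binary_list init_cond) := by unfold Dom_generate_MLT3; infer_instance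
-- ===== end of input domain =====

-- ===== PORT A =====
-- B changes: single phase index into the fixed MLT-3 pattern instead of (last, growing) with overflow/flip (objective: simpler).
def stepA (st : Int × Bool × List Int) (bit : Int) : Int × Bool × List Int :=
  let last := st.1
  let growing := st.2.1
  let result := st.2.2
  if bit ≠ 0 then
    let last' := if growing then last + 1 else last - 1
    if last' > 1 ∨ last' < -1 then (0, !growing, result ++ [(0 : Int)])
    else (last', growing, result ++ [last'])
  else (last, growing, result ++ [last])

def generate_MLT3 (binary_list : List Int) (init_cond : Int) : List Int :=
  let growing := init_cond == 1
  let last : Int := if init_cond == 0 then 1 else if init_cond == 3 then -1 else 0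
  (binary_list.foldl stepA (last, growing, [])).2.2

-- ===== PORT B =====
def mlt3Pattern : Nat → Int
  | 0 => 0
  | 1 => 1
  | 2 => 0
  | _ => -1

def stepB (st : Nat × List Int) (bit : Int) : Nat × List Int :=
  let phase := if bit ≠ 0 then (st.1 + 1) % 4 else st.1
  (phase, st.2 ++ [mlt3Pattern phase])

def generate_MLT3_alt (binary_list : List Int) (init_cond : Int) : List Int :=
  let phase : Nat :=
    if init_cond == 1 then 0
    else if init_cond == 0 then 1
    else if init_cond == 3 then 3
    else 2
  (binary_list.foldl stepB (phase, [])).2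

-- ===== PRECONDITION & SPEC =====
def Spec_generate_MLT3 (binary_list : List Int) (init_cond : Int) (out : List Int) : Prop := out = generate_MLT3_alt binary_list init_cond
instance (binary_list : List Int) (init_cond : Int) (out : List Int) : Decidable (Spec_generate_MLT3 binary_list init_cond out) := by unfold Spec_generate_MLT3; infer_instance

-- ===== CLAIM (what is proved, stated in full; the proofs are below) =====
def Claim_equal_generate_MLT3 : Prop := ∀ (binary_list : List Int) (init_cond : Int), Dom_generate_MLT3 binary_list init_cond → Spec_generate_MLT3 binary_list init_cond (generate_MLT3 binary_list init_cond)

-- ===== LEMMAS AND PROOFS =====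
-- Invariant linking A's (last, growing) state to B's phase.
def MLT3Rel (phase : Nat) (last : Int) (growing : Bool) : Prop :=
  match phase with
  | 0 => last = 0 ∧ growing = true
  | 1 => last = 1
  | 2 => last = 0 ∧ growing = false
  | 3 => last = -1 ∧ growing = false
  | _ => False

theorem mlt3_loop_eq (l : List Int) (phase : Nat) (last : Int) (growing : Bool)
    (acc : List Int) (h : MLT3Rel phase last growing) :
    (l.foldl stepA (last, growing, acc)).2.2 = (l.foldl stepB (phase, acc)).2 := by
  induction l generalizing phase last growing acc with
  | nil => rfl
  | cons bit rest ih =>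
    simp only [List.foldl_cons]
    rcases phase with _ | _ | _ | _ | p
    · obtain ⟨h1, h2⟩ := h
      subst h1; subst h2
      by_cases hb : bit = 0
      · simp [stepA, stepB, hb]; exact ih 0 0 true _ ⟨rfl, rfl⟩
      · simp [stepA, stepB, hb, mlt3Pattern]; exact ih 1 1 true _ rfl
    · subst h
      by_cases hb : bit = 0
      · simp [stepA, stepB, hb]; exact ih 1 1 growing _ rfl
      · cases growing <;> simp [stepA, stepB, hb, mlt3Pattern] <;>
          exact ih 2 0 false _ ⟨rfl, rfl⟩
    · obtain ⟨h1, h2⟩ := h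
      subst h1; subst h2
      by_cases hb : bit = 0
      · simp [stepA, stepB, hb]; exact ih 2 0 false _ ⟨rfl, rfl⟩
      · simp [stepA, stepB, hb, mlt3Pattern]; exact ih 3 (-1) false _ ⟨rfl, rfl⟩
    · obtain ⟨h1, h2⟩ := h
      subst h1; subst h2
      by_cases hb : bit = 0
      · simp [stepA, stepB, hb, mlt3Pattern]; exact ih 3 (-1) false _ ⟨rfl, rfl⟩
      · simp [stepA, stepB, hb, mlt3Pattern]; exact ih 0 0 true _ ⟨rfl, rfl⟩
    · exact absurd h (by simp [MLT3Rel])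

-- ===== VERDICT (by name: the statement is the Claim_ definition above) =====
theorem generate_MLT3_spec : Claim_equal_generate_MLT3 := by
  intro binary_list init_cond _
  unfold Spec_generate_MLT3 generate_MLT3 generate_MLT3_alt
  by_cases h1 : init_cond = 1
  · simp only [h1]; exact mlt3_loop_eq _ 0 0 true [] ⟨rfl, rfl⟩
  · by_cases h0 : init_cond = 0
    · simp [h0]; exact mlt3_loop_eq _ 1 1 false [] rfl
    · by_cases h3 : init_cond = 3
      · simp [h3]; exact mlt3_loop_eq _ 3 (-1) false [] ⟨rfl, rfl⟩
      · have hg : (init_cond == 1) = false := by simpa using h1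
        simp [h0, h3, hg]; exact mlt3_loop_eq _ 2 0 false [] ⟨rfl, rfl⟩
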